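-- pv_equiv track=rewrite | github.com/aarsh-sharma/Competitive-Programming | GJam/Trouble Sort.py | trouble
-- ===== SOURCE A (Python) =====
-- def trouble(a):
--     flag = 0
--     while(flag == 0):
--         flag = 1
--         for x in range(len(a) - 2):
--             if(a[x] > a[x+2]):
--                 temp = a[x]
--                 a[x] = a[x+2]
--                 a[x+2] = temp
--                 flag = 0
--     return a
-- ===== SOURCE B (Python) =====
-- def trouble(a):
--     # Return value only: A sorts `a` in place and returns it; B leaves `a` unchanged
--     # and returns a new sorted list equal to A's return value.
--     ev, od = [], []
--     for i, x in enumerate(a):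
--         if i % 2 == 0:
--             ev.append(x)
--         else:
--             od.append(x)
--     ev.sort()
--     od.sort()
--     out = []
--     for e, o in zip(ev, od):
--         out.append(e)
--         out.append(o)
--     if len(od) < len(ev):
--         out.append(ev[-1])
--     return out
-- ===== Notes on version B (the rewrite author's own statement) =====
-- stated objective: faster
-- what changed: A repeatedly bubble-passes the list swapping a[x] with a[x+2] until no swap occurs; B splits the list into the even- and odd-indexed subsequences, sorts each with the built-in sort, and interleaves them back (return value only: A also sorts its argument in place, B does not mutate it).
import Mathlib
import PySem

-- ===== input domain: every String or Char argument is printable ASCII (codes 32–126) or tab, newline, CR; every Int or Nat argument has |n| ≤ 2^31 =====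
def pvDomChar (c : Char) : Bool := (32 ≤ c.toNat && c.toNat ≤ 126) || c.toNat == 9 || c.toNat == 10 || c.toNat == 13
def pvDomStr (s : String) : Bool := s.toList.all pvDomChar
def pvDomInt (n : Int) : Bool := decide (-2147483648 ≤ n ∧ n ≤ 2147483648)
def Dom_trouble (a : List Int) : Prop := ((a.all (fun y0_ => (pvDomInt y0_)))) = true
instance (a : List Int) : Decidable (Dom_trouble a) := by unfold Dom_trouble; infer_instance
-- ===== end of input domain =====

-- B replaces A's repeated distance-2 bubble passes by sorting the even- and odd-indexed
-- subsequences separately and interleaving them; return value only: A sorts its argument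
-- in place and returns it, B leaves the argument unchanged.

-- ===== PORT A =====
-- One pass of A's inner `for x in range(len(a)-2)` loop, as the structural recursion over
-- the list: position x is final once compared, so the loop is a cursor moving right; the
-- Int flag is threaded exactly as in the Python (set to 0 on a swap).
def passRec : List Int → Int → List Int × Int
  | p :: q :: r :: t, flag =>
    if p > r then
      let res := passRec (q :: p :: t) 0
      (r :: res.1, res.2)
    else
      let res := passRec (q :: r :: t) flag
      (p :: res.1, res.2)
  | l, flag => (l, flag)
termination_by l _ => l.length
decreasing_by all_goals simp

-- Helper definitions for the fuel bound of A's while-loop: mu a counts the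
-- same-parity inversions of a (unweave splits a into its even/odd subsequences,
-- inv counts inversions); the loop is run with fuel mu a + 1, which never runs
-- out (trouble_eq below: mu strictly decreases on every repeated pass).
def unweave : List Int → List Int × List Int
  | [] => ([], [])
  | x :: xs => let p := unweave xs; (x :: p.2, p.1)

def inv : List Int → Nat
  | [] => 0
  | x :: xs => xs.countP (fun y => decide (y < x)) + inv xs

def mu (a : List Int) : Nat := inv (unweave a).1 + inv (unweave a).2

-- A's while-loop: each iteration resets flag to 1, runs the pass, repeats while
-- flag == 0; the fuel argument only makes it total.
def troubleLoop : Nat → List Int → List Int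
  | 0, a => a
  | fuel + 1, a =>
    let res := passRec a 1
    if res.2 = 0 then troubleLoop fuel res.1 else res.1

def trouble (a : List Int) : List Int := troubleLoop (mu a + 1) a

-- ===== PORT B =====
def trouble_alt (a : List Int) : List Int :=
  let p := (PySem.List.enumerate a 0).foldl
    (fun (p : List Int × List Int) ix =>
      if PySem.Int.mod ix.1 2 == 0 then (p.1 ++ [ix.2], p.2) else (p.1, p.2 ++ [ix.2]))
    ([], [])
  let ev := PySem.List.sorted p.1 (fun x => x) false
  let od := PySem.List.sorted p.2 (fun x => x) false
  let out := (ev.zip od).foldl (fun acc eo => acc ++ [eo.1, eo.2]) []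
  -- ev[-1]: the guard len(od) < len(ev) makes the index always in range
  if od.length < ev.length then out ++ [PySem.List.pyGetD ev (-1) 0] else out

-- ===== PRECONDITION & SPEC =====
def Spec_trouble (a : List Int) (out : List Int) : Prop := out = trouble_alt a
instance (a : List Int) (out : List Int) : Decidable (Spec_trouble a out) := by unfold Spec_trouble; infer_instance

-- ===== CLAIM (what is proved, stated in full; the proofs are below) =====
def Claim_equal_trouble : Prop := ∀ (a : List Int), Dom_trouble a → Spec_trouble a (trouble a)

-- ===== LEMMAS AND PROOFS =====
def weave : List Int → List Int → List Int
  | [], ys => ys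
  | x :: xs, ys => x :: weave ys xs
termination_by e o => e.length + o.length
decreasing_by simp; omega

-- ordinary adjacent bubble pass, with a Bool "swapped" flag
def bpass : List Int → List Int × Bool
  | x :: y :: t =>
    if x > y then
      let res := bpass (x :: t)
      (y :: res.1, true)
    else
      let res := bpass (y :: t)
      (x :: res.1, res.2)
  | l => (l, false)
termination_by l => l.length
decreasing_by all_goals simp

theorem bpass_length (l : List Int) : (bpass l).1.length = l.length := by
  induction l using bpass.induct with
  | case1 x y t h ih => simp only [bpass, if_pos h]; simpa using ih
  | case2 x y t h ih => simp only [bpass, if_neg h]; simpa using ih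
  | case3 l h =>
    rcases l with _ | ⟨x, _ | ⟨y, t⟩⟩
    · simp [bpass]
    · simp [bpass]
    · exact (h x y t rfl).elim

theorem bpass_perm (l : List Int) : (bpass l).1.Perm l := by
  induction l using bpass.induct with
  | case1 x y t h ih =>
    simp only [bpass, if_pos h]
    exact (ih.cons y).trans (List.Perm.swap x y t)
  | case2 x y t h ih =>
    simp only [bpass, if_neg h]
    exact ih.cons x
  | case3 l h =>
    rcases l with _ | ⟨x, _ | ⟨y, t⟩⟩
    · simp [bpass]
    · simp [bpass]
    · exact (h x y t rfl).elim

theorem bpass_inv (l : List Int) :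
    inv (bpass l).1 + (if (bpass l).2 then 1 else 0) ≤ inv l := by
  induction l using bpass.induct with
  | case1 x y t h ih =>
    have ih' : inv (bpass (x :: t)).1 ≤ inv (x :: t) := le_trans (Nat.le_add_right _ _) ih
    have hc : ((bpass (x :: t)).1).countP (fun z => decide (z < y))
        = ((x :: t)).countP (fun z => decide (z < y)) := (bpass_perm (x :: t)).countP_eq _
    have hxy : ¬ (x < y) := by omega
    simp only [bpass, if_pos h]
    simp [inv, hc, hxy, h]
    simp [inv] at ih'
    omega
  | case2 x y t h ih =>
    have hc : ((bpass (y :: t)).1).countP (fun z => decide (z < x))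
        = ((y :: t)).countP (fun z => decide (z < x)) := (bpass_perm (y :: t)).countP_eq _
    simp only [bpass, if_neg h]
    simp [inv, hc]
    simp [inv] at ih
    omega
  | case3 l hl =>
    rcases l with _ | ⟨x, _ | ⟨y, t⟩⟩
    · simp [bpass, inv]
    · simp [bpass, inv]
    · exact (hl x y t rfl).elim

theorem bpass_inv_lt (l : List Int) (h : (bpass l).2 = true) : inv (bpass l).1 < inv l := by
  have := bpass_inv l
  rw [h] at this; simpa using Nat.lt_of_lt_of_le (Nat.lt_succ_self _) (by simpa using this)

theorem unweave_len (l : List Int) :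
    (unweave l).2.length ≤ (unweave l).1.length ∧
      (unweave l).1.length ≤ (unweave l).2.length + 1 := by
  induction l with
  | nil => simp [unweave]
  | cons x xs ih => simp [unweave]; omega

theorem unweave_weave (e o : List Int) (h1 : o.length ≤ e.length)
    (h2 : e.length ≤ o.length + 1) : unweave (weave e o) = (e, o) := by
  induction e, o using weave.induct with
  | case1 ys =>
    have : ys = [] := List.eq_nil_of_length_eq_zero (Nat.le_zero.mp h1)
    subst this; simp [weave, unweave]
  | case2 x xs ys ih =>
    simp only [weave, unweave]
    rw [ih (by simpa using h2) (by simpa using h1)]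

-- A's pass on the interleaved list IS a bubble pass on each parity class
theorem passRec_eq (l : List Int) (f : Int) :
    passRec l f =
      (weave (bpass (unweave l).1).1 (bpass (unweave l).2).1,
        if (bpass (unweave l).1).2 || (bpass (unweave l).2).2 then 0 else f) := by
  induction l, f using passRec.induct with
  | case1 p q r t flag h ih =>
    simp only [passRec, if_pos h, ih]
    simp only [unweave, weave, bpass, if_pos h]
    simp
  | case2 p q r t flag h ih =>
    simp only [passRec, if_neg h, ih]
    simp only [unweave, weave, bpass, if_neg h]
    simp [Bool.or_comm]
  | case3 l flag h =>
    rcases l with _ | ⟨x, _ | ⟨y, _ | ⟨z, t⟩⟩⟩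
    · simp [passRec, unweave, bpass, weave]
    · simp [passRec, unweave, bpass, weave]
    · simp [passRec, unweave, bpass, weave]
    · exact (h x y z t rfl).elim

theorem passRec_mu_lt (a : List Int) (h : (passRec a 1).2 = 0) :
    mu (passRec a 1).1 < mu a := by
  have he := passRec_eq a 1
  have hlen := unweave_len a
  have hl1 := bpass_length (unweave a).1
  have hl2 := bpass_length (unweave a).2
  have huw : unweave (weave (bpass (unweave a).1).1 (bpass (unweave a).2).1)
      = ((bpass (unweave a).1).1, (bpass (unweave a).2).1) :=
    unweave_weave _ _ (by omega) (by omega)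
  rw [he] at h ⊢
  simp only [mu, huw]
  simp only at h
  by_cases hfe : (bpass (unweave a).1).2 = true
  · have h1 := bpass_inv_lt _ hfe
    have h2 : inv (bpass (unweave a).2).1 ≤ inv (unweave a).2 :=
      le_trans (Nat.le_add_right _ _) (bpass_inv _)
    omega
  · have hfo : (bpass (unweave a).2).2 = true := by
      by_contra hfo
      simp [Bool.not_eq_true] at hfe hfo
      simp [hfe, hfo] at h
    have h1 := bpass_inv_lt _ hfo
    have h2 : inv (bpass (unweave a).1).1 ≤ inv (unweave a).1 :=
      le_trans (Nat.le_add_right _ _) (bpass_inv _)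
    omega

theorem bpass_false_eq (l : List Int) (h : (bpass l).2 = false) : (bpass l).1 = l := by
  induction l using bpass.induct with
  | case1 x y t hxy ih => simp [bpass, if_pos hxy] at h
  | case2 x y t hxy ih =>
    simp only [bpass, if_neg hxy] at h ⊢
    simp [ih h]
  | case3 l hl =>
    rcases l with _ | ⟨x, _ | ⟨y, t⟩⟩
    · simp [bpass]
    · simp [bpass]
    · exact (hl x y t rfl).elim

theorem bpass_false_pairwise (l : List Int) (h : (bpass l).2 = false) :
    l.Pairwise (· ≤ ·) := by
  induction l using bpass.induct with
  | case1 x y t hxy ih => simp [bpass, if_pos hxy] at h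
  | case2 x y t hxy ih =>
    simp only [bpass, if_neg hxy] at h
    have hp := ih (by simpa using h)
    rcases List.pairwise_cons.mp hp with ⟨hy, hpt⟩
    refine List.pairwise_cons.mpr ⟨?_, hp⟩
    intro z hz
    rcases List.mem_cons.mp hz with rfl | hz
    · omega
    · exact le_trans (by omega) (hy z hz)
  | case3 l hl =>
    rcases l with _ | ⟨x, _ | ⟨y, t⟩⟩
    · exact List.Pairwise.nil
    · exact List.Pairwise.cons (by simp) List.Pairwise.nil
    · exact (hl x y t rfl).elim

def bsort (l : List Int) : List Int :=
  let p := bpass l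
  if p.2 then bsort p.1 else p.1
termination_by inv l
decreasing_by exact bpass_inv_lt l (by assumption)

theorem bsort_eq (l : List Int) :
    bsort l = if (bpass l).2 then bsort (bpass l).1 else (bpass l).1 := by
  rw [bsort]

theorem bsort_bpass (l : List Int) : bsort (bpass l).1 = bsort l := by
  by_cases hb : (bpass l).2 = true
  · conv_rhs => rw [bsort_eq]
    simp [hb]
  · rw [bpass_false_eq l (by simpa using hb)]

theorem bsort_perm (l : List Int) : (bsort l).Perm l := by
  induction l using bsort.induct with
  | case1 l p hp ih =>
    have hpd : p = bpass l := rfl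
    rw [hpd] at hp ih
    rw [bsort_eq]
    simp only [hp, if_true]
    exact ih.trans (bpass_perm l)
  | case2 l p hp =>
    have hpd : p = bpass l := rfl
    rw [hpd] at hp
    simp only [Bool.not_eq_true] at hp
    rw [bsort_eq]
    simp only [hp, Bool.false_eq_true, if_false]
    exact bpass_perm l

theorem bsort_pairwise (l : List Int) : (bsort l).Pairwise (· ≤ ·) := by
  induction l using bsort.induct with
  | case1 l p hp ih =>
    have hpd : p = bpass l := rfl
    rw [hpd] at hp ih
    rw [bsort_eq]
    simp only [hp, if_true]
    exact ih
  | case2 l p hp =>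
    have hpd : p = bpass l := rfl
    rw [hpd] at hp
    simp only [Bool.not_eq_true] at hp
    rw [bsort_eq]
    simp only [hp, Bool.false_eq_true, if_false]
    rw [bpass_false_eq l hp]
    exact bpass_false_pairwise l hp
theorem bsort_false (l : List Int) (h : (bpass l).2 = false) : bsort l = l := by
  rw [bsort_eq]
  simp [h, bpass_false_eq l h]

theorem troubleLoop_eq (fuel : Nat) :
    ∀ a : List Int, mu a < fuel →
      troubleLoop fuel a = weave (bsort (unweave a).1) (bsort (unweave a).2) := by
  induction fuel with
  | zero => exact fun a h => absurd h (Nat.not_lt_zero _)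
  | succ fuel ih =>
    intro a h
    simp only [troubleLoop]
    by_cases hres : (passRec a 1).2 = 0
    · simp only [hres]
      rw [ih _ (by have := passRec_mu_lt a hres; omega)]
      have he := passRec_eq a 1
      have h1 := bpass_length (unweave a).1
      have h2 := bpass_length (unweave a).2
      have hlen := unweave_len a
      have huw : unweave (weave (bpass (unweave a).1).1 (bpass (unweave a).2).1)
          = ((bpass (unweave a).1).1, (bpass (unweave a).2).1) :=
        unweave_weave _ _ (by omega) (by omega)
      rw [he]
      simp only [huw]
      rw [bsort_bpass, bsort_bpass]
      rw [if_pos trivial]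
    · rw [if_neg hres]
      have he := passRec_eq a 1
      have hf : ((bpass (unweave a).1).2 || (bpass (unweave a).2).2) = false := by
        by_contra hco
        rw [Bool.not_eq_false] at hco
        rw [he] at hres
        simp [hco] at hres
      rw [Bool.or_eq_false_iff] at hf
      rw [he]
      simp only
      rw [bpass_false_eq _ hf.1, bpass_false_eq _ hf.2,
        bsort_false _ hf.1, bsort_false _ hf.2]

theorem trouble_eq (a : List Int) :
    trouble a = weave (bsort (unweave a).1) (bsort (unweave a).2) :=
  troubleLoop_eq (mu a + 1) a (Nat.lt_succ_self _)

theorem deinter (xs : List Int) (s : Int) (ev od : List Int) :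
    (PySem.List.enumerate xs s).foldl
      (fun (p : List Int × List Int) ix =>
        if PySem.Int.mod ix.1 2 == 0 then (p.1 ++ [ix.2], p.2) else (p.1, p.2 ++ [ix.2]))
      (ev, od)
    = if s % 2 = 0 then (ev ++ (unweave xs).1, od ++ (unweave xs).2)
      else (ev ++ (unweave xs).2, od ++ (unweave xs).1) := by
  induction xs generalizing s ev od with
  | nil => simp [PySem.List.enumerate_nil, unweave]
  | cons x xs ih =>
    rw [PySem.List.enumerate_cons]
    by_cases hs : s % 2 = 0
    · have hb : (PySem.Int.mod s 2 == 0) = true := by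
        rw [PySem.Int.mod_eq_emod_of_pos (by norm_num : (0:Int) < 2)]; simp [hs]
      simp only [List.foldl_cons, hb, if_true]
      rw [ih (s + 1)]
      have hs1 : ¬ ((s + 1) % 2 = 0) := by omega
      simp [hs, hs1, unweave]
    · have hb : (PySem.Int.mod s 2 == 0) = false := by
        rw [PySem.Int.mod_eq_emod_of_pos (by norm_num : (0:Int) < 2)]; simp [hs]
      simp only [List.foldl_cons, hb, Bool.false_eq_true, if_false]
      rw [ih (s + 1)]
      have hs1 : (s + 1) % 2 = 0 := by omega
      simp [hs, hs1, unweave]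
theorem zipfold_weave (e o : List Int) (h1 : o.length ≤ e.length)
    (h2 : e.length ≤ o.length + 1) :
    (if o.length < e.length then
        ((e.zip o).foldl (fun acc eo => acc ++ [eo.1, eo.2]) []) ++ [PySem.List.pyGetD e (-1) 0]
      else (e.zip o).foldl (fun acc eo => acc ++ [eo.1, eo.2]) [])
    = weave e o := by
  rw [PySem.List.foldl_append_eq_flatMap]
  induction o generalizing e with
  | nil =>
    rcases e with _ | ⟨x, _ | ⟨y, t⟩⟩
    · simp [weave]
    · simp [weave, PySem.List.pyGetD_neg_one [x] 0 (by simp)]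
    · simp at h2
  | cons y o ih =>
    rcases e with _ | ⟨x, e⟩
    · simp at h1
    · have h1' : o.length ≤ e.length := by simpa using h1
      have h2' : e.length ≤ o.length + 1 := by simpa using h2
      have := ih e h1' h2'
      simp only [List.zip_cons_cons, List.flatMap_cons, List.nil_append] at *
      by_cases hlt : o.length < e.length
      · have he : e ≠ [] := by
          intro hh; rw [hh] at hlt; simp at hlt
        have hget : PySem.List.pyGetD (x :: e) (-1) 0 = PySem.List.pyGetD e (-1) 0 := by
          rw [PySem.List.pyGetD_neg_one (x :: e) 0 (by simp),
            PySem.List.pyGetD_neg_one e 0 he]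
          exact List.getLast_cons he
        have hlt2 : (y :: o).length < (x :: e).length := by simp; omega
        rw [if_pos hlt2, hget]
        rw [if_pos hlt] at this
        simp only [weave]
        rw [← this]
        simp
      · have hlt2 : ¬ ((y :: o).length < (x :: e).length) := by simp; omega
        rw [if_neg hlt2]
        rw [if_neg hlt] at this
        simp only [weave]
        rw [← this]
        simp
theorem trouble_alt_eq (a : List Int) :
    trouble_alt a = weave (PySem.List.sorted (unweave a).1 (fun x => x) false)
        (PySem.List.sorted (unweave a).2 (fun x => x) false) := by
  unfold trouble_alt
  rw [deinter a 0 [] []]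
  rw [if_pos (by norm_num : (0:Int) % 2 = 0)]
  simp only [List.nil_append]
  have hl := unweave_len a
  have e1 := PySem.List.length_sorted (unweave a).1 (fun x => x) false
  have e2 := PySem.List.length_sorted (unweave a).2 (fun x => x) false
  exact zipfold_weave _ _ (by omega) (by omega)

theorem bsort_eq_sorted (l : List Int) :
    bsort l = PySem.List.sorted l (fun x => x) false :=
  (PySem.List.sorted_id_eq_of_perm_of_pairwise l (bsort l) (bsort_perm l) (bsort_pairwise l)).symm

-- ===== VERDICT (by name: the statement is the Claim_ definition above) =====
theorem trouble_spec : Claim_equal_trouble := by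
  intro a _
  unfold Spec_trouble
  rw [trouble_eq, trouble_alt_eq, bsort_eq_sorted, bsort_eq_sorted]
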